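-- pv_equiv track=rewrite | github.com/glmanhtu/vit-ed | misc/utils.py | n_batches
-- ===== SOURCE A (Python) =====
-- def n_batches(size, current_batch=-1):
--     total = []
--     for i in range(size):
--         if i == current_batch:
--             return len(total)
--         for j in range(size):
--             if j < i:
--                 continue
--             total.append(j)
--     return len(total)
-- ===== SOURCE B (Python) =====
-- def n_batches(size, current_batch=-1):
--     k = current_batch if 0 <= current_batch < size else max(size, 0)
--     return k * size - k * (k - 1) // 2
-- ===== Notes on version B (the rewrite author's own statement) =====
-- stated objective: faster
-- what changed: Replaced the nested append loops by a closed-form partial triangular-number formula: k*size - k*(k-1)//2 with k = current_batch if it lies in [0, size) else max(size, 0).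
import Mathlib
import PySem

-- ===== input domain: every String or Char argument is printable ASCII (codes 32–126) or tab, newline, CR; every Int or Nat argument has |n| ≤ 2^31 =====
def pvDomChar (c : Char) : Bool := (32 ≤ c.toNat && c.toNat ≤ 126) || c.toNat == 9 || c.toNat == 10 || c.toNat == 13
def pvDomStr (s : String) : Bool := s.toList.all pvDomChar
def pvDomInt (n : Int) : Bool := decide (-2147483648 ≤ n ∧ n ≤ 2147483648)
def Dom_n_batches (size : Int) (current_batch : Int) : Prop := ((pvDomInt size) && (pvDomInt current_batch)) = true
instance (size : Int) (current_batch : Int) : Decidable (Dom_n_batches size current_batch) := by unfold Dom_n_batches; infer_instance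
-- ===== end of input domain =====

-- B replaces A's quadratic append loops by a closed-form partial triangular sum (objective: faster).

-- ===== PORT A =====
-- outer loop: early return at i = current_batch, else append the inner loop's survivors
def nbLoopA (xs : List Int) (current_batch : Int) (size : Int) (total : List Int) : Int :=
  match xs with
  | [] => (total.length : Int)
  | i :: rest =>
    if i = current_batch then (total.length : Int)
    else nbLoopA rest current_batch size
      (total ++ (PySem.List.pyRange 0 size 1).filter (fun j => !(j < i)))

def n_batches (size : Int) (current_batch : Int) : Int :=
  nbLoopA (PySem.List.pyRange 0 size 1) current_batch size []

-- ===== PORT B =====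
def n_batches_alt (size : Int) (current_batch : Int) : Int :=
  let k : Int := if 0 ≤ current_batch ∧ current_batch < size then current_batch else max size 0
  k * size - PySem.Int.floordiv (k * (k - 1)) 2

-- ===== PRECONDITION & SPEC =====
def Spec_n_batches (size : Int) (current_batch : Int) (out : Int) : Prop := out = n_batches_alt size current_batch
instance (size : Int) (current_batch : Int) (out : Int) : Decidable (Spec_n_batches size current_batch out) := by unfold Spec_n_batches; infer_instance

-- ===== CLAIM (what is proved, stated in full; the proofs are below) =====
def Claim_equal_n_batches : Prop := ∀ (size : Int) (current_batch : Int), Dom_n_batches size current_batch → Spec_n_batches size current_batch (n_batches size current_batch)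

-- ===== LEMMAS AND PROOFS =====

-- the accumulator only contributes its length
theorem nbLoopA_acc (xs : List Int) (cb size : Int) :
    ∀ total : List Int, nbLoopA xs cb size total = (total.length : Int) + nbLoopA xs cb size [] := by
  induction xs with
  | nil => intro total; simp [nbLoopA]
  | cons i rest ih =>
    intro total
    by_cases h : i = cb
    · simp [nbLoopA, h]
    · simp only [nbLoopA, if_neg h, List.nil_append]
      rw [ih (total ++ _), ih ((PySem.List.pyRange 0 size 1).filter (fun j => !(j < i)))]
      simp only [List.length_append]
      push_cast; ring

-- the inner loop appends exactly size - i elements when 0 ≤ i ≤ size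
theorem nbInner_len (size i : Int) (h0 : 0 ≤ i) (h1 : i ≤ size) :
    (((PySem.List.pyRange 0 size 1).filter (fun j => !(j < i))).length : Int) = size - i := by
  rw [PySem.List.pyRange_one_append 0 i size h0 h1, List.filter_append]
  have e1 : (PySem.List.pyRange 0 i 1).filter (fun j => !(j < i)) = [] := by
    rw [List.filter_eq_nil_iff]
    intro x hx
    have := (PySem.List.mem_pyRange_one).1 hx
    simp [this.2]
  have e2 : (PySem.List.pyRange i size 1).filter (fun j => !(j < i)) = PySem.List.pyRange i size 1 := by
    rw [List.filter_eq_self]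
    intro x hx
    have := (PySem.List.mem_pyRange_one).1 hx
    simp [not_lt.2 this.1]
  rw [e1, e2, List.nil_append, PySem.List.length_pyRange_one]
  omega

-- closed form for the tail of the outer loop, doubled to avoid division
theorem nbLoopA_closed (size cb : Int) :
    ∀ (n : Nat) (a : Int), 0 ≤ a → size - a ≤ (n : Int) →
    2 * nbLoopA (PySem.List.pyRange a size 1) cb size [] =
      ((if 0 ≤ cb ∧ a ≤ cb ∧ cb < size then cb else max size a) - a) *
        (2 * size - (if 0 ≤ cb ∧ a ≤ cb ∧ cb < size then cb else max size a) - a + 1) := by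
  intro n
  induction n with
  | zero =>
    intro a ha hn
    rw [PySem.List.pyRange_one_eq_nil (by omega)]
    simp only [nbLoopA, List.length_nil]
    split_ifs with h
    · exact absurd h (by omega)
    · have hm : max size a = a := by omega
      rw [hm]; push_cast; ring
  | succ n ih =>
    intro a ha hn
    by_cases hsa : size ≤ a
    · rw [PySem.List.pyRange_one_eq_nil hsa]
      simp only [nbLoopA, List.length_nil]
      split_ifs with h
      · exact absurd h (by omega)
      · have hm : max size a = a := by omega
        rw [hm]; push_cast; ring
    · have hlt : a < size := by omega
      rw [PySem.List.pyRange_one_cons hlt]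
      simp only [nbLoopA]
      by_cases hcb : a = cb
      · simp only [if_pos hcb, List.length_nil]
        subst hcb
        rw [if_pos (⟨ha, le_refl a, hlt⟩ : 0 ≤ a ∧ a ≤ a ∧ a < size)]
        push_cast; ring
      · simp only [if_neg hcb, List.nil_append]
        rw [nbLoopA_acc]
        have hlen := nbInner_len size a ha (le_of_lt hlt)
        have hrec := ih (a + 1) (by omega) (by omega)
        have hKeq : (if 0 ≤ cb ∧ a ≤ cb ∧ cb < size then cb else max size a)
            = (if 0 ≤ cb ∧ a + 1 ≤ cb ∧ cb < size then cb else max size (a + 1)) := by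
          by_cases h1 : 0 ≤ cb ∧ a ≤ cb ∧ cb < size
          · have h2 : 0 ≤ cb ∧ a + 1 ≤ cb ∧ cb < size := ⟨h1.1, by omega, h1.2.2⟩
            rw [if_pos h1, if_pos h2]
          · have h2 : ¬ (0 ≤ cb ∧ a + 1 ≤ cb ∧ cb < size) := by
              intro h2; exact h1 ⟨h2.1, by omega, h2.2.2⟩
            rw [if_neg h1, if_neg h2]
            omega
        rw [hKeq]
        set K : Int := if 0 ≤ cb ∧ a + 1 ≤ cb ∧ cb < size then cb else max size (a + 1) with hKdef
        have expand : (K - a) * (2 * size - K - a + 1)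
            = 2 * (size - a) + (K - (a + 1)) * (2 * size - K - (a + 1) + 1) := by ring
        rw [expand, mul_add, hlen, hrec]

-- ===== VERDICT (by name: the statement is the Claim_ definition above) =====
theorem n_batches_spec : Claim_equal_n_batches := by
  intro size cb _
  unfold Spec_n_batches n_batches n_batches_alt
  have h := nbLoopA_closed size cb (size.toNat) 0 le_rfl (by omega)
  have hcond : (if 0 ≤ cb ∧ (0:Int) ≤ cb ∧ cb < size then cb else max size 0)
      = (if 0 ≤ cb ∧ cb < size then cb else max size 0) := by
    by_cases hc : 0 ≤ cb ∧ cb < size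
    · rw [if_pos ⟨hc.1, hc.1, hc.2⟩, if_pos hc]
    · have : ¬ (0 ≤ cb ∧ (0:Int) ≤ cb ∧ cb < size) := by tauto
      rw [if_neg this, if_neg hc]
  rw [hcond] at h
  set k : Int := if 0 ≤ cb ∧ cb < size then cb else max size 0 with hk
  rcases Int.even_mul_succ_self (k - 1) with ⟨c, hc⟩
  have hc2 : k * (k - 1) = 2 * c := by
    rw [show k * (k - 1) = (k - 1) * (k - 1 + 1) by ring, hc]; ring
  show nbLoopA (PySem.List.pyRange 0 size 1) cb size [] = k * size - PySem.Int.floordiv (k * (k - 1)) 2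
  rw [hc2, PySem.Int.floordiv_eq_ediv_of_pos (by norm_num), Int.mul_ediv_cancel_left c (by norm_num)]
  have h2 : 2 * nbLoopA (PySem.List.pyRange 0 size 1) cb size [] = 2 * (k * size) - 2 * c := by
    rw [h]; rw [show (k - 0) * (2 * size - k - 0 + 1) = 2 * (k * size) - k * (k - 1) by ring, hc2]
  linarith
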